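-- pv_equiv track=rewrite | github.com/FranckChristin/Python_lab | test_lab/croissant.py | search_small
-- ===== SOURCE A (Python) =====
-- def search_small(arr):
--
--     petite_valeur = arr[0]
--     petit_index = 0
--
--     for i in range(len(arr)):
--         if arr[i] < petite_valeur:
--             petite_valeur = arr[i]
--             petit_index = i
--
--     return (petit_index)
-- ===== SOURCE B (Python) =====
-- def search_small(arr):
--     return arr.index(min(arr))
-- ===== Notes on version B (the rewrite author's own statement) =====
-- stated objective: idiomatic
-- what changed: Replaces the fused index loop tracking (value, index) with two builtin passes: min(arr) then arr.index(min), preserving first-occurrence ties; Pre_ excludes the empty list, on which A raises IndexError (B raises ValueError).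
import Mathlib
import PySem

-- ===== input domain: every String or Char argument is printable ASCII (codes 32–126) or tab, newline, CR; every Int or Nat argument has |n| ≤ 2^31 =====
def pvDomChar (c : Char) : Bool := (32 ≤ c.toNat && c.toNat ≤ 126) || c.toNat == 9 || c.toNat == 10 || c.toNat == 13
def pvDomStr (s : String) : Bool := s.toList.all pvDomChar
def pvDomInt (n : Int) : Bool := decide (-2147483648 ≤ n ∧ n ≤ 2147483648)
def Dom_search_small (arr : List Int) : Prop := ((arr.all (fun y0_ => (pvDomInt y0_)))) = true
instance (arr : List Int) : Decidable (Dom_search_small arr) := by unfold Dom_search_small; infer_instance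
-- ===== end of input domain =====

-- B is the idiomatic two-pass version (min + first index of it); same result, ties to first occurrence.

-- ===== PORT A =====
def search_small (arr : List Int) : Int :=
  let petite_valeur : Int := PySem.List.pyGetD arr 0 0   -- arr[0]; empty arr (IndexError) is excluded by Pre_
  let r := (PySem.List.pyRange 0 (arr.length : Int) 1).foldl
    (fun (st : Int × Int) i =>
      if PySem.List.pyGetD arr i 0 < st.1 then (PySem.List.pyGetD arr i 0, i) else st)
    (petite_valeur, 0)
  r.2

-- ===== PORT B =====
def search_small_alt (arr : List Int) : Int :=
  match PySem.List.min? arr (fun x => x) with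
  | none => 0                                             -- unreachable under Pre_ (empty arr)
  | some m =>
    match PySem.List.index? arr m with
    | none => 0                                           -- unreachable: the minimum is in arr
    | some k => (k : Int)

-- ===== PRECONDITION & SPEC =====
-- A raises IndexError on the empty list (arr[0]); Pre_ excludes exactly that input.
def Pre_search_small (arr : List Int) : Prop := arr ≠ []
instance (arr : List Int) : Decidable (Pre_search_small arr) := by unfold Pre_search_small; infer_instance
def pvWitness_search_small : List Int := ([3, 1, 2])

def Spec_search_small (arr : List Int) (out : Int) : Prop := out = search_small_alt arr
instance (arr : List Int) (out : Int) : Decidable (Spec_search_small arr out) := by unfold Spec_search_small; infer_instance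

-- ===== CLAIM (what is proved, stated in full; the proofs are below) =====
def Claim_equal_search_small : Prop := ∀ (arr : List Int), Dom_search_small arr → Pre_search_small arr → Spec_search_small arr (search_small arr)

-- ===== LEMMAS AND PROOFS =====

-- the loop body of A, on (index, value) pairs
def pvStep (st : Int × Int) (p : Int × Int) : Int × Int :=
  if p.2 < st.1 then (p.2, p.1) else st

theorem pv_foldl_min_le_init (l : List Int) (m : Int) : l.foldl min m ≤ m := by
  induction l generalizing m with
  | nil => simp
  | cons v l ih => exact le_trans (ih (min m v)) (min_le_left m v)

theorem pv_foldl_min_le_mem (l : List Int) (m w : Int) (hw : w ∈ l) : l.foldl min m ≤ w := by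
  induction l generalizing m with
  | nil => simp at hw
  | cons v l ih =>
    rcases List.mem_cons.mp hw with h | h
    · subst h; exact le_trans (pv_foldl_min_le_init l (min m w)) (min_le_right m w)
    · exact ih (min m v) h

theorem pv_foldl_min_of_le (l : List Int) (m : Int) (h : ∀ w ∈ l, m ≤ w) : l.foldl min m = m := by
  induction l generalizing m with
  | nil => rfl
  | cons v l ih =>
    have : min m v = m := min_eq_left (h v (by simp))
    simp only [List.foldl_cons, this]
    exact ih m (fun w hw => h w (by simp [hw]))

theorem pv_main (l : List Int) (m j s : Int) :
    (PySem.List.enumerate l s).foldl pvStep (m, j) =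
      if ∀ v ∈ l, m ≤ v then (m, j)
      else (l.foldl min m, s + (l.idxOf (l.foldl min m) : Int)) := by
  induction l generalizing m j s with
  | nil => simp [PySem.List.enumerate_nil]
  | cons v l ih =>
    rw [PySem.List.enumerate_cons, List.foldl_cons]
    by_cases hv : v < m
    · have hstep : pvStep (m, j) (s, v) = (v, s) := by simp [pvStep, hv]
      rw [hstep, ih]
      have hmin : min m v = v := min_eq_right (le_of_lt hv)
      have hcond : ¬ (∀ w ∈ v :: l, m ≤ w) := by
        intro h; exact absurd (h v (by simp)) (not_le.mpr hv)
      rw [if_neg hcond]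
      by_cases hall : ∀ w ∈ l, v ≤ w
      · rw [if_pos hall]
        have hM : (v :: l).foldl min m = v := by
          simp only [List.foldl_cons, hmin]; exact pv_foldl_min_of_le l v hall
        rw [hM, List.idxOf_cons_self]
        simp
      · rw [if_neg hall]
        have hM : (v :: l).foldl min m = l.foldl min v := by
          simp only [List.foldl_cons, hmin]
        rw [hM]
        have hne : l.foldl min v ≠ v := by
          rw [not_forall] at hall
          simp only [not_forall, exists_prop, not_le] at hall
          obtain ⟨w, hw, hwv⟩ := hall
          exact ne_of_lt (lt_of_le_of_lt (pv_foldl_min_le_mem l v w hw) hwv)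
        rw [List.idxOf_cons_ne _ (by exact fun h => hne h.symm)]
        simp only [Prod.mk.injEq, true_and]
        push_cast
        ring
    · have hstep : pvStep (m, j) (s, v) = (m, j) := by simp [pvStep, hv]
      rw [hstep, ih]
      have hmv : m ≤ v := not_lt.mp hv
      by_cases hall : ∀ w ∈ l, m ≤ w
      · rw [if_pos hall, if_pos (by intro w hw; rcases List.mem_cons.mp hw with h | h
                                    · exact h ▸ hmv
                                    · exact hall w h)]
      · rw [if_neg hall]
        have hcond : ¬ (∀ w ∈ v :: l, m ≤ w) := by
          intro h; exact hall (fun w hw => h w (by simp [hw]))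
        rw [if_neg hcond]
        have hM : (v :: l).foldl min m = l.foldl min m := by
          simp only [List.foldl_cons, min_eq_left hmv]
        rw [hM]
        have hne : l.foldl min m ≠ v := by
          rw [not_forall] at hall
          simp only [not_forall, exists_prop, not_le] at hall
          obtain ⟨w, hw, hwm⟩ := hall
          exact ne_of_lt (lt_of_le_of_lt (pv_foldl_min_le_mem l m w hw)
            (lt_of_lt_of_le hwm hmv))
        rw [List.idxOf_cons_ne _ (by exact fun h => hne h.symm)]
        simp only [Prod.mk.injEq, true_and]
        push_cast
        ring

-- A's fold over range(len(arr)) is the fold of pvStep over enumerate arr 0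
theorem pv_A_eq_enumerate (x : Int) (t : List Int) :
    search_small (x :: t) = ((PySem.List.enumerate (x :: t) 0).foldl pvStep (x, 0)).2 := by
  unfold search_small
  rw [PySem.List.enumerate_eq_map_pyRange (x :: t) 0, List.foldl_map]
  simp [pvStep, PySem.List.pyGetD]

theorem pv_idxOf?_of_mem (l : List Int) (a : Int) (h : a ∈ l) :
    List.idxOf? a l = some (l.idxOf a) := by
  rw [List.idxOf_eq_getD_idxOf?]
  cases hx : List.idxOf? a l with
  | none => exact absurd h (List.idxOf?_eq_none_iff.mp hx)
  | some k => rfl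

theorem pv_B_eq (x : Int) (t : List Int) :
    search_small_alt (x :: t) = (((x :: t).idxOf (t.foldl min x) : Nat) : Int) := by
  have hMmem : t.foldl min x ∈ x :: t :=
    PySem.List.min?_mem (by rw [PySem.List.min?_id_cons])
  unfold search_small_alt
  rw [PySem.List.min?_id_cons]
  simp [pv_idxOf?_of_mem _ _ hMmem]

-- ===== VERDICT (by name: the statement is the Claim_ definition above) =====
theorem search_small_spec : Claim_equal_search_small := by
  intro arr _ hpre
  unfold Spec_search_small
  match arr with
  | [] => exact absurd rfl hpre
  | x :: t =>
    rw [pv_A_eq_enumerate, pv_main, pv_B_eq]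
    by_cases hall : ∀ v ∈ x :: t, x ≤ v
    · rw [if_pos hall]
      have hMx : t.foldl min x = x := pv_foldl_min_of_le t x (fun w hw => hall w (by simp [hw]))
      rw [hMx, List.idxOf_cons_self]
      simp
    · rw [if_neg hall]
      have hMeq : (x :: t).foldl min x = t.foldl min x := by
        simp only [List.foldl_cons, min_self]
      rw [hMeq]
      simp
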